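-- pv_equiv track=rewrite | github.com/b-ryu/yt-mp3-dl | yt-metadata.py | get_mime_type
-- ===== SOURCE A (Python) =====
-- def get_mime_type(url_or_path):
--     mime_map = {
--         '.jpg': 'image/jpeg',
--         '.jpeg': 'image/jpeg',
--         '.png': 'image/png'
--     }
--     mime_type = None
--
--     for file_ext in mime_map:
--         if url_or_path.endswith(file_ext):
--             mime_type = mime_map[file_ext]
--
--     return mime_type
-- ===== SOURCE B (Python) =====
-- def get_mime_type(url_or_path):
--     mime_map = {
--         '.jpg': 'image/jpeg',
--         '.jpeg': 'image/jpeg',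
--         '.png': 'image/png'
--     }
--     ext = ''
--     for ch in reversed(url_or_path):
--         ext = ch + ext
--         if ch == '.':
--             return mime_map.get(ext)
--     return None
-- ===== Notes on version B (the rewrite author's own statement) =====
-- stated objective: simpler
-- what changed: B extracts the extension by scanning the string once from the end up to the first '.' and does a single dict lookup, instead of A's loop over all dict keys with an endswith suffix test per key.
import Mathlib
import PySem

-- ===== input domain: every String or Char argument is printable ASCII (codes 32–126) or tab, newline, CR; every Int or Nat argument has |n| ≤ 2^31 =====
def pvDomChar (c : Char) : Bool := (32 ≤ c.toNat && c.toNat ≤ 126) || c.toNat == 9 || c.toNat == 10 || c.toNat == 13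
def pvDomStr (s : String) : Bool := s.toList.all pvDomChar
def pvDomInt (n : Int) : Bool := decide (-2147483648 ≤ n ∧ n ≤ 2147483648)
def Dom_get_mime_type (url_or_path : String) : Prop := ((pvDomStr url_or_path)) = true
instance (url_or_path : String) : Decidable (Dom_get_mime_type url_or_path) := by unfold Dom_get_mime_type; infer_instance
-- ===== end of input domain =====

-- B replaces A's per-key suffix scan by one reverse walk extracting the extension plus a single dict lookup (objective: simpler).

-- ===== PORT A =====
-- the dict literal, as an association list in insertion order
def pvMimeMap : List (String × String) :=
  [(".jpg", "image/jpeg"), (".jpeg", "image/jpeg"), (".png", "image/png")]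

-- 'for file_ext in mime_map: if url_or_path.endswith(file_ext): mime_type = mime_map[file_ext]'
-- (iterating the dict's keys in insertion order; mime_map[file_ext] is the paired value)
def get_mime_type (url_or_path : String) : Option String :=
  pvMimeMap.foldl
    (fun mime_type kv =>
      if PySem.Str.endswith url_or_path kv.1 then some kv.2 else mime_type)
    none

-- ===== PORT B =====
-- B's dict (same literal), looked up once with .get
def pvMimeDict : PySem.Dict String String := PySem.Dict.ofList pvMimeMap

-- B's loop: 'for ch in reversed(url_or_path): ext = ch + ext; if ch == '.': return mime_map.get(ext)'
-- as structural recursion over the reversed character list, accumulator ext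
def pvExtLoop (r : List Char) (ext : List Char) : Option String :=
  match r with
  | [] => none
  | ch :: rest =>
      let ext' := ch :: ext
      if ch = '.' then pvMimeDict.get? (String.ofList ext')
      else pvExtLoop rest ext'

def get_mime_type_alt (url_or_path : String) : Option String :=
  pvExtLoop url_or_path.toList.reverse []

-- ===== PRECONDITION & SPEC =====
def Spec_get_mime_type (url_or_path : String) (out : Option String) : Prop := out = get_mime_type_alt url_or_path
instance (url_or_path : String) (out : Option String) : Decidable (Spec_get_mime_type url_or_path out) := by unfold Spec_get_mime_type; infer_instance

-- ===== CLAIM (what is proved, stated in full; the proofs are below) =====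
def Claim_equal_get_mime_type : Prop := ∀ (url_or_path : String), Dom_get_mime_type url_or_path → Spec_get_mime_type url_or_path (get_mime_type url_or_path)

-- ===== LEMMAS AND PROOFS =====

-- B's loop computes: if there is a dot, look up '.' ++ (chars of r before its first dot, re-reversed) ++ ext
theorem pvExtLoop_spec (r ext : List Char) :
    pvExtLoop r ext =
      if '.' ∈ r then
        pvMimeDict.get? (String.ofList ('.' :: ((r.takeWhile (· ≠ '.')).reverse ++ ext)))
      else none := by
  induction r generalizing ext with
  | nil => simp [pvExtLoop]
  | cons c t ih =>
    by_cases hc : c = '.'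
    · subst hc; simp [pvExtLoop]
    · have hm : ('.' ∈ (c :: t)) ↔ ('.' ∈ t) := by
        constructor
        · intro h
          rcases List.mem_cons.mp h with h | h
          · exact absurd h.symm hc
          · exact h
        · exact fun h => List.mem_cons_of_mem _ h
      simp only [pvExtLoop, if_neg hc, ih (c :: ext), List.takeWhile_cons, hm]
      by_cases hd : '.' ∈ t
      · simp [hd, hc, List.append_assoc]
      · simp [hd]

-- the first element surviving dropWhile fails the predicate
theorem pv_dropWhile_head_false {α : Type} (p : α → Bool) :
    ∀ (l : List α) (x : α) (xs : List α), l.dropWhile p = x :: xs → p x = false := by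
  intro l
  induction l with
  | nil => intro x xs h; cases h
  | cons a t ih =>
    intro x xs h
    rw [List.dropWhile_cons] at h
    by_cases hpa : p a = true
    · rw [if_pos hpa] at h; exact ih x xs h
    · rw [if_neg hpa] at h
      cases h
      simpa using hpa

-- takeWhile = pre  ↔  pre ++ ['.'] is a prefix, for a dot-free pre, when a dot exists
theorem pv_tw_iff (r pre : List Char) (hd : '.' ∈ r) (hpre : ∀ c ∈ pre, c ≠ '.') :
    r.takeWhile (· ≠ '.') = pre ↔ (pre ++ ['.']) <+: r := by
  constructor
  · intro h
    have hsplit : r = r.takeWhile (· ≠ '.') ++ r.dropWhile (· ≠ '.') :=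
      (List.takeWhile_append_dropWhile).symm
    have hne : r.dropWhile (· ≠ '.') ≠ [] := by
      intro hnil
      have h0 : '.' ∈ List.takeWhile (fun x => decide (x ≠ '.')) r ++
          List.dropWhile (fun x => decide (x ≠ '.')) r := by
        rw [← hsplit]; exact hd
      rw [hnil, List.append_nil] at h0
      have h1 := List.mem_takeWhile_imp (p := fun x => decide (x ≠ '.')) h0
      simp at h1
    obtain ⟨x, xs, hx⟩ := List.exists_cons_of_ne_nil hne
    have hxdot : x = '.' := by
      have h2 := pv_dropWhile_head_false (fun c => decide (c ≠ '.')) r x xs hx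
      simpa using h2
    rw [h, hx, hxdot] at hsplit
    exact ⟨xs, by rw [hsplit]; simp⟩
  · rintro ⟨rest, hr⟩
    subst hr
    clear hd
    induction pre with
    | nil => simp
    | cons p ps ihp =>
      have hp : p ≠ '.' := hpre p (by simp)
      have ihp' := ihp (fun c hcm => hpre c (List.mem_cons_of_mem _ hcm))
      simp only [List.cons_append, List.takeWhile_cons]
      simp [hp]
      simpa using ihp'

-- endswith k ↔ the reversed key is a prefix of the reversed string
theorem pv_endswith_iff (s : String) (k : String) :
    PySem.Str.endswith s k = true ↔ (k.toList.reverse <+: s.toList.reverse) := by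
  rw [PySem.Str.endswith_eq, PySem.Chars.endswith_iff, List.reverse_prefix]

-- '.'-prefixed reversed accumulators differ when the tails differ
theorem pv_rev_ne (tw a : List Char) (h : tw ≠ a.reverse) :
    ('.' :: tw.reverse) ≠ ('.' :: a) := by
  intro he
  apply h
  have h2 := (List.cons.inj he).2
  have h3 := congrArg List.reverse h2
  simpa using h3

-- lookup of a key that is none of the three dict keys
theorem pvMime_get?_none (key : String) (h1 : key ≠ ".jpg") (h2 : key ≠ ".jpeg")
    (h3 : key ≠ ".png") : pvMimeDict.get? key = none := by
  have hmk : pvMimeDict = PySem.Dict.mk pvMimeMap := by decide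
  rw [hmk]
  unfold pvMimeMap
  rw [PySem.Dict.get?_mk_cons, PySem.Dict.get?_mk_cons, PySem.Dict.get?_mk_cons]
  simp [beq_iff_eq, Ne.symm h1, Ne.symm h2, Ne.symm h3, PySem.Dict.get?]

set_option maxRecDepth 8192 in
theorem get_mime_type_eq_alt (s : String) : get_mime_type s = get_mime_type_alt s := by
  have e1 := pv_endswith_iff s ".jpg"
  have e2 := pv_endswith_iff s ".jpeg"
  have e3 := pv_endswith_iff s ".png"
  simp only [show (".jpg" : String).toList.reverse = ['g', 'p', 'j', '.'] from rfl,
    show (".jpeg" : String).toList.reverse = ['g', 'e', 'p', 'j', '.'] from rfl,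
    show (".png" : String).toList.reverse = ['g', 'n', 'p', '.'] from rfl] at e1 e2 e3
  set r := s.toList.reverse with hr
  unfold get_mime_type get_mime_type_alt pvMimeMap
  rw [← hr, pvExtLoop_spec]
  simp only [List.foldl, List.append_nil]
  by_cases hd : '.' ∈ r
  · simp only [hd, if_true]
    have i1 := pv_tw_iff r ['g', 'p', 'j'] hd (by simp)
    have i2 := pv_tw_iff r ['g', 'e', 'p', 'j'] hd (by simp)
    have i3 := pv_tw_iff r ['g', 'n', 'p'] hd (by simp)
    set tw := r.takeWhile (· ≠ '.') with htw
    by_cases h1 : tw = ['g', 'p', 'j']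
    · have hp1 : PySem.Str.endswith s ".jpg" = true := e1.mpr (i1.mp h1)
      have hp2 : PySem.Str.endswith s ".jpeg" = false := by
        by_contra hc
        have hq := i2.mpr (by simpa using (e2.mp (by simpa using hc)))
        rw [h1] at hq
        exact absurd hq (by decide)
      have hp3 : PySem.Str.endswith s ".png" = false := by
        by_contra hc
        have hq := i3.mpr (by simpa using (e3.mp (by simpa using hc)))
        rw [h1] at hq
        exact absurd hq (by decide)
      rw [hp1, hp2, hp3, h1]
      decide
    · by_cases h2 : tw = ['g', 'e', 'p', 'j']
      · have hp1 : PySem.Str.endswith s ".jpg" = false := by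
          by_contra hc
          have hq := i1.mpr (by simpa using (e1.mp (by simpa using hc)))
          rw [h2] at hq
          exact absurd hq (by decide)
        have hp2 : PySem.Str.endswith s ".jpeg" = true := e2.mpr (i2.mp h2)
        have hp3 : PySem.Str.endswith s ".png" = false := by
          by_contra hc
          have hq := i3.mpr (by simpa using (e3.mp (by simpa using hc)))
          rw [h2] at hq
          exact absurd hq (by decide)
        rw [hp1, hp2, hp3, h2]
        decide
      · by_cases h3 : tw = ['g', 'n', 'p']
        · have hp1 : PySem.Str.endswith s ".jpg" = false := by
            by_contra hc
            have hq := i1.mpr (by simpa using (e1.mp (by simpa using hc)))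
            rw [h3] at hq
            exact absurd hq (by decide)
          have hp2 : PySem.Str.endswith s ".jpeg" = false := by
            by_contra hc
            have hq := i2.mpr (by simpa using (e2.mp (by simpa using hc)))
            rw [h3] at hq
            exact absurd hq (by decide)
          have hp3 : PySem.Str.endswith s ".png" = true := e3.mpr (i3.mp h3)
          rw [hp1, hp2, hp3, h3]
          decide
        · have hp1 : PySem.Str.endswith s ".jpg" = false := by
            by_contra hc
            exact h1 (i1.mpr (by simpa using (e1.mp (by simpa using hc))))
          have hp2 : PySem.Str.endswith s ".jpeg" = false := by
            by_contra hc
            exact h2 (i2.mpr (by simpa using (e2.mp (by simpa using hc))))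
          have hp3 : PySem.Str.endswith s ".png" = false := by
            by_contra hc
            exact h3 (i3.mpr (by simpa using (e3.mp (by simpa using hc))))
          rw [hp1, hp2, hp3]
          refine Eq.trans (by simp) (pvMime_get?_none _ ?_ ?_ ?_).symm
          · intro he
            exact pv_rev_ne tw ['j', 'p', 'g'] (by simpa using h1) (by simpa using congrArg String.toList he)
          · intro he
            exact pv_rev_ne tw ['j', 'p', 'e', 'g'] (by simpa using h2) (by simpa using congrArg String.toList he)
          · intro he
            exact pv_rev_ne tw ['p', 'n', 'g'] (by simpa using h3) (by simpa using congrArg String.toList he)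
  · simp only [hd, if_false]
    have hp1 : PySem.Str.endswith s ".jpg" = false := by
      by_contra hc
      obtain ⟨t, ht⟩ := e1.mp (by simpa using hc)
      exact hd (by rw [← ht]; simp)
    have hp2 : PySem.Str.endswith s ".jpeg" = false := by
      by_contra hc
      obtain ⟨t, ht⟩ := e2.mp (by simpa using hc)
      exact hd (by rw [← ht]; simp)
    have hp3 : PySem.Str.endswith s ".png" = false := by
      by_contra hc
      obtain ⟨t, ht⟩ := e3.mp (by simpa using hc)
      exact hd (by rw [← ht]; simp)
    rw [hp1, hp2, hp3]
    simp

-- ===== VERDICT (by name: the statement is the Claim_ definition above) =====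
theorem get_mime_type_spec : Claim_equal_get_mime_type := by
  intro s _
  unfold Spec_get_mime_type
  exact get_mime_type_eq_alt s
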